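-- pv_equiv track=rewrite | github.com/NicoleVentsch/Refining-Event-Labels | tests/refiningEventLabels/lib/verticalClustering/verticalClustering.py | inSameVariant
-- ===== SOURCE A (Python) =====
-- def inSameVariant(component1, component2, variants):
--     """
--     Auxiliary function to determine if two connected components corresponding to the same label are in the same variant (according to section 5.4 in the paper)
--
--     :param component1: first component given as a list of event IDs
--     :param component2: second component given as a list of event IDs
--     :param variants: list of variants given as a list of tuples (eventID, event label), i.e., a list of lists of tuples
--     :returns: boolean; True if the connected components are in the same variant, False otherwise
--     """
--     for event1 in component1:
--         for event2 in component2: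
--             for variant in variants:
--                 contains1 = False
--                 contains2 = False
--                 for eventID, _ in variant:
--                     if event1 == eventID:
--                         contains1 = True
--                     if event2 == eventID:
--                         contains2 = True
--                 if contains1 and contains2:
--                     return True
--
--     return False
-- ===== SOURCE B (Python) =====
-- def inSameVariant(component1, component2, variants):
--     # Inverted index: eventID -> set of indices of variants containing it.
--     index = {}
--     for i, variant in enumerate(variants):
--         for eventID, _ in variant:
--             index.setdefault(eventID, set()).add(i)
--     v1 = set()
--     for event in component1:
--         v1 |= index.get(event, set())
--     v2 = set()
--     for event in component2:
--         v2 |= index.get(event, set())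
--     return bool(v1 & v2)
-- ===== Notes on version B (the rewrite author's own statement) =====
-- stated objective: faster
-- what changed: Replaced the quadruple-nested per-pair rescanning of variants by an inverted index (eventID -> set of variant indices) built in one pass, then gathering each component's index set and testing the intersection for non-emptiness.
import Mathlib
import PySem

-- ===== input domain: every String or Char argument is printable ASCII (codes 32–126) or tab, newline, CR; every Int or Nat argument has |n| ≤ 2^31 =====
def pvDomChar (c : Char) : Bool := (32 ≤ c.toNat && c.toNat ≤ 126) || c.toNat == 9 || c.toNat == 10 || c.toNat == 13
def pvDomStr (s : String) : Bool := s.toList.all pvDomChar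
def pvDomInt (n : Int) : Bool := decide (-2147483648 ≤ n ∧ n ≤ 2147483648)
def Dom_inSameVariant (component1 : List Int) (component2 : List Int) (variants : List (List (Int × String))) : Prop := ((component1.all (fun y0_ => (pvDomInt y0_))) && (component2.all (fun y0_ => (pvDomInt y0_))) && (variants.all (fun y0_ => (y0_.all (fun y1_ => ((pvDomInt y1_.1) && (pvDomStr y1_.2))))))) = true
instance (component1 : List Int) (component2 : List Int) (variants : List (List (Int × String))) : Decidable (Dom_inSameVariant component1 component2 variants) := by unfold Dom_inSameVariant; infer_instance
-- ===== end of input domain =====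

-- B replaces A's nested per-pair rescans by an inverted index (eventID -> variant indices),
-- gathering index sets for each component and intersecting them (objective: faster single pass over variants).

-- ===== PORT A =====
-- triple nested loop with early return True; contains1/contains2 carried as a Bool pair through the variant scan
def inSameVariant (component1 : List Int) (component2 : List Int) (variants : List (List (Int × String))) : Bool :=
  component1.any (fun event1 =>
    component2.any (fun event2 =>
      variants.any (fun variant =>
        let c := variant.foldl
          (fun (c : Bool × Bool) q => (c.1 || (event1 == q.1), c.2 || (event2 == q.1)))
          (false, false)
        c.1 && c.2)))

-- ===== PORT B =====
-- index.setdefault(eventID, set()).add(i)  ==  Dict.modify eventID [] (Set.add · i)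
def pvIndex (variants : List (List (Int × String))) : PySem.Dict Int (PySem.Set Int) :=
  (PySem.List.enumerate variants 0).foldl
    (fun d p => p.2.foldl (fun d q => d.modify q.1 [] (fun s => PySem.Set.add s p.1)) d)
    PySem.Dict.empty

def inSameVariant_alt (component1 : List Int) (component2 : List Int) (variants : List (List (Int × String))) : Bool :=
  let index := pvIndex variants
  let v1 := component1.foldl (fun s e => PySem.Set.union s (index.getD e [])) []
  let v2 := component2.foldl (fun s e => PySem.Set.union s (index.getD e [])) []
  !(PySem.Set.inter v1 v2).isEmpty

-- ===== PRECONDITION & SPEC =====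
def Spec_inSameVariant (component1 : List Int) (component2 : List Int) (variants : List (List (Int × String))) (out : Bool) : Prop := out = inSameVariant_alt component1 component2 variants
instance (component1 : List Int) (component2 : List Int) (variants : List (List (Int × String))) (out : Bool) : Decidable (Spec_inSameVariant component1 component2 variants out) := by unfold Spec_inSameVariant; infer_instance

-- ===== CLAIM (what is proved, stated in full; the proofs are below) =====
def Claim_equal_inSameVariant : Prop := ∀ (component1 : List Int) (component2 : List Int) (variants : List (List (Int × String))), Dom_inSameVariant component1 component2 variants → Spec_inSameVariant component1 component2 variants (inSameVariant component1 component2 variants)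

-- ===== LEMMAS AND PROOFS =====

-- A's inner variant scan computes the pair of 'any' checks
lemma pvFoldA (e1 e2 : Int) (v : List (Int × String)) (b1 b2 : Bool) :
    v.foldl (fun (c : Bool × Bool) q => (c.1 || (e1 == q.1), c.2 || (e2 == q.1))) (b1, b2)
      = (b1 || v.any (fun q => e1 == q.1), b2 || v.any (fun q => e2 == q.1)) := by
  induction v generalizing b1 b2 with
  | nil => simp
  | cons q v ih => simp [List.foldl_cons, ih, Bool.or_assoc]

lemma pvA_iff (c1 c2 : List Int) (vs : List (List (Int × String))) :
    inSameVariant c1 c2 vs = true ↔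
      ∃ e1 ∈ c1, ∃ e2 ∈ c2, ∃ v ∈ vs, (∃ q ∈ v, e1 = q.1) ∧ (∃ q ∈ v, e2 = q.1) := by
  simp [inSameVariant, pvFoldA, List.any_eq_true]
  tauto

-- index membership: one variant's scan
lemma pvMemInner (i j e : Int) (v : List (Int × String)) (d : PySem.Dict Int (PySem.Set Int)) :
    j ∈ (v.foldl (fun d q => d.modify q.1 [] (fun s => PySem.Set.add s i)) d).getD e [] ↔
      (j = i ∧ ∃ q ∈ v, q.1 = e) ∨ j ∈ d.getD e [] := by
  induction v generalizing d with
  | nil => simp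
  | cons q v ih =>
    rw [List.foldl_cons, ih, PySem.Dict.getD_modify]
    by_cases he : e = q.1
    · rw [if_pos he]
      subst he
      simp only [PySem.Set.mem_add, List.mem_cons]
      constructor
      · rintro (⟨hj, q', hq', hq'e⟩ | hmem | hji)
        · exact Or.inl ⟨hj, q', Or.inr hq', hq'e⟩
        · exact Or.inr hmem
        · exact Or.inl ⟨hji, q, Or.inl rfl, rfl⟩
      · rintro (⟨hj, q', (rfl | hq'), hq'e⟩ | hmem)
        · exact Or.inr (Or.inr hj)
        · exact Or.inl ⟨hj, q', hq', hq'e⟩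
        · exact Or.inr (Or.inl hmem)
    · rw [if_neg he]
      simp only [List.mem_cons]
      constructor
      · rintro (⟨hj, q', hq', hq'e⟩ | hmem)
        · exact Or.inl ⟨hj, q', Or.inr hq', hq'e⟩
        · exact Or.inr hmem
      · rintro (⟨hj, q', (rfl | hq'), hq'e⟩ | hmem)
        · exact absurd hq'e.symm he
        · exact Or.inl ⟨hj, q', hq', hq'e⟩
        · exact Or.inr hmem

-- index membership: the whole enumerate fold
lemma pvMemOuter (j e : Int) (ps : List (Int × List (Int × String))) (d : PySem.Dict Int (PySem.Set Int)) :
    j ∈ (ps.foldl (fun d p => p.2.foldl (fun d q => d.modify q.1 [] (fun s => PySem.Set.add s p.1)) d) d).getD e [] ↔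
      (∃ p ∈ ps, j = p.1 ∧ ∃ q ∈ p.2, q.1 = e) ∨ j ∈ d.getD e [] := by
  induction ps generalizing d with
  | nil => simp
  | cons p ps ih =>
    rw [List.foldl_cons, ih, pvMemInner]
    simp only [List.mem_cons]
    constructor
    · rintro (⟨p', hp', h⟩ | h | h)
      · exact Or.inl ⟨p', Or.inr hp', h⟩
      · exact Or.inl ⟨p, Or.inl rfl, h⟩
      · exact Or.inr h
    · rintro (⟨p', (rfl | hp'), h⟩ | h)
      · exact Or.inr (Or.inl h)
      · exact Or.inl ⟨p', hp', h⟩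
      · exact Or.inr (Or.inr h)

lemma pvMemIndex (j e : Int) (vs : List (List (Int × String))) :
    j ∈ (pvIndex vs).getD e [] ↔
      ∃ (k : Nat), ∃ (h : k < vs.length), j = (k : Int) ∧ ∃ q ∈ vs[k], q.1 = e := by
  unfold pvIndex
  rw [pvMemOuter]
  simp [PySem.List.mem_enumerate_iff]

-- gathering a component's variant-index set
lemma pvMemGather (j : Int) (c : List Int) (idx : PySem.Dict Int (PySem.Set Int)) (s0 : PySem.Set Int) :
    j ∈ c.foldl (fun s e => PySem.Set.union s (idx.getD e [])) s0 ↔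
      j ∈ s0 ∨ ∃ e ∈ c, j ∈ idx.getD e [] := by
  induction c generalizing s0 with
  | nil => simp
  | cons e c ih =>
    rw [List.foldl_cons, ih]
    simp [PySem.Set.mem_union]
    tauto

lemma pvB_iff (c1 c2 : List Int) (vs : List (List (Int × String))) :
    inSameVariant_alt c1 c2 vs = true ↔
      ∃ (k : Nat), ∃ (h : k < vs.length),
        (∃ e1 ∈ c1, ∃ q ∈ vs[k], q.1 = e1) ∧ (∃ e2 ∈ c2, ∃ q ∈ vs[k], q.1 = e2) := by
  unfold inSameVariant_alt
  simp only [Bool.not_eq_eq_eq_not, Bool.not_true, List.isEmpty_eq_false_iff_exists_mem]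
  constructor
  · rintro ⟨j, hj⟩
    rw [PySem.Set.mem_inter] at hj
    obtain ⟨h1, h2⟩ := hj
    rw [pvMemGather] at h1 h2
    simp at h1 h2
    obtain ⟨e1, he1, hm1⟩ := h1
    obtain ⟨e2, he2, hm2⟩ := h2
    rw [pvMemIndex] at hm1 hm2
    obtain ⟨k, hk, hjk, q1, hq1, hq1e⟩ := hm1
    obtain ⟨k', hk', hjk', q2, hq2, hq2e⟩ := hm2
    have : k = k' := by omega
    subst this
    exact ⟨k, hk, ⟨e1, he1, q1, hq1, hq1e⟩, ⟨e2, he2, q2, hq2, hq2e⟩⟩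
  · rintro ⟨k, hk, ⟨e1, he1, q1, hq1, hq1e⟩, ⟨e2, he2, q2, hq2, hq2e⟩⟩
    refine ⟨(k : Int), ?_⟩
    rw [PySem.Set.mem_inter, pvMemGather, pvMemGather]
    exact ⟨Or.inr ⟨e1, he1, (pvMemIndex _ _ _).mpr ⟨k, hk, rfl, q1, hq1, hq1e⟩⟩,
           Or.inr ⟨e2, he2, (pvMemIndex _ _ _).mpr ⟨k, hk, rfl, q2, hq2, hq2e⟩⟩⟩

-- ===== VERDICT (by name: the statement is the Claim_ definition above) =====
theorem inSameVariant_spec : Claim_equal_inSameVariant := by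
  intro c1 c2 vs _
  unfold Spec_inSameVariant
  have hA := pvA_iff c1 c2 vs
  have hB := pvB_iff c1 c2 vs
  have key : inSameVariant c1 c2 vs = true ↔ inSameVariant_alt c1 c2 vs = true := by
    rw [hA, hB]
    constructor
    · rintro ⟨e1, he1, e2, he2, v, hv, ⟨q1, hq1, hq1e⟩, ⟨q2, hq2, hq2e⟩⟩
      obtain ⟨k, hk, hvk⟩ := List.mem_iff_getElem.mp hv
      subst hvk
      exact ⟨k, hk, ⟨e1, he1, q1, hq1, hq1e.symm⟩, ⟨e2, he2, q2, hq2, hq2e.symm⟩⟩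
    · rintro ⟨k, hk, ⟨e1, he1, q1, hq1, hq1e⟩, ⟨e2, he2, q2, hq2, hq2e⟩⟩
      exact ⟨e1, he1, e2, he2, vs[k], List.getElem_mem hk, ⟨q1, hq1, hq1e.symm⟩, ⟨q2, hq2, hq2e.symm⟩⟩
  cases hA' : inSameVariant c1 c2 vs <;> cases hB' : inSameVariant_alt c1 c2 vs <;> simp_all
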